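-- pv_equiv track=rewrite | github.com/TawfikLabStanford/Identifying-EHR-Activity-Using-Computer-Vision | validate_results.py | match_transitions_with_tolerance_detailed
-- ===== SOURCE A (Python) =====
-- def match_transitions_with_tolerance_detailed(gt_times: list, pred_times: list, delta: int = 2) -> (int, list):
--     """
--     Match predicted transitions to ground truth with tolerance window (detailed version).
--
--     For each ground truth transition time, any predicted transition time within
--     [t - delta, t + delta] is considered a match.
--
--     Parameters:
--         gt_times: Ground truth transition times
--         pred_times: Predicted transition times
--         delta (int): Tolerance in frames (default: 2, per paper Section 3.2.2)
--
--     Returns: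
--         tuple: (matched_count, time_differences)
--     """
--     matched_count = 0
--     used_pred = set()
--     time_diffs = []
--     # Sort the lists to ensure proper matching
--     gt_times_sorted = sorted(gt_times)
--     pred_times_sorted = sorted(pred_times)
--     for gt_time in gt_times_sorted:
--         low_bound = gt_time - delta
--         high_bound = gt_time + delta
--         # Find the first available candidate within the tolerance window
--         candidates = [pt for pt in pred_times_sorted if low_bound <= pt <= high_bound and pt not in used_pred]
--         if candidates:
--             matched = candidates[0]
--             matched_count += 1
--             used_pred.add(matched)
--             time_diffs.append(abs(gt_time - matched))
--     return matched_count, time_diffs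
-- ===== SOURCE B (Python) =====
-- def match_transitions_with_tolerance_detailed(gt_times: list, pred_times: list, delta: int = 2) -> (int, list):
--     # Two-pointer sweep over sorted distinct predictions: for each ground-truth
--     # time (ascending) skip predictions below the window, then greedily take the
--     # smallest remaining prediction if it lies within the window.
--     preds = sorted(set(pred_times))
--     n = len(preds)
--     i = 0
--     matched_count = 0
--     time_diffs = []
--     for t in sorted(gt_times):
--         lo = t - delta
--         while i < n and preds[i] < lo:
--             i += 1
--         if i < n and preds[i] <= t + delta:
--             matched_count += 1
--             time_diffs.append(abs(t - preds[i]))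
--             i += 1
--     return matched_count, time_diffs
-- ===== Notes on version B (the rewrite author's own statement) =====
-- stated objective: faster
-- what changed: Replaces A's per-ground-truth rescan of all predictions (a filter over the whole sorted prediction list plus a set-membership test for each gt time) with a single advancing two-pointer sweep over the sorted distinct prediction values, exploiting that skipped predictions can never match later windows.
import Mathlib
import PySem

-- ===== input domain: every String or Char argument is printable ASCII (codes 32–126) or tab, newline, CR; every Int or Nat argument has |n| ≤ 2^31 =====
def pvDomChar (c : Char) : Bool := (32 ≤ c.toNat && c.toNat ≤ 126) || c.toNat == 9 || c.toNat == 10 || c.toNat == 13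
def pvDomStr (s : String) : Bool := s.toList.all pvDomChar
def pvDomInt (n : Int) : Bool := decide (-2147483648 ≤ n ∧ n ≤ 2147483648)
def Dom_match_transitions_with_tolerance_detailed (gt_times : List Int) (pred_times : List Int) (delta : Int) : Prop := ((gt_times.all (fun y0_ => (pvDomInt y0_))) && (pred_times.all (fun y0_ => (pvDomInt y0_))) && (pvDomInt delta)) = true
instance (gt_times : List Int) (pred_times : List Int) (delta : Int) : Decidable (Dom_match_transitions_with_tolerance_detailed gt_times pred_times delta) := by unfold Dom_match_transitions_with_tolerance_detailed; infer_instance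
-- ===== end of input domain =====

-- B replaces A's per-gt rescan of all predictions with one advancing pointer
-- over the sorted distinct prediction values (objective: faster).

-- ===== PORT A =====
-- loop body of A's 'for gt_time in gt_times_sorted'
def stepA (pts : List Int) (delta : Int) (s : Int × PySem.Set Int × List Int) (gt_time : Int) : Int × PySem.Set Int × List Int :=
  let low_bound := gt_time - delta
  let high_bound := gt_time + delta
  let candidates := pts.filter (fun pt => decide (low_bound ≤ pt) && decide (pt ≤ high_bound) && !(PySem.Set.contains s.2.1 pt))
  match candidates with
  | [] => s
  | matched :: _ => (s.1 + 1, PySem.Set.add s.2.1 matched, s.2.2 ++ [|gt_time - matched|])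

def match_transitions_with_tolerance_detailed (gt_times : List Int) (pred_times : List Int) (delta : Int) : Int × List Int :=
  let gt_times_sorted := PySem.List.sorted gt_times (fun x => x) false
  let pred_times_sorted := PySem.List.sorted pred_times (fun x => x) false
  let r := gt_times_sorted.foldl (stepA pred_times_sorted delta) (0, PySem.Set.empty, [])
  (r.1, r.2.2)

-- ===== PORT B =====
-- B's 'for t in sorted(gt_times)' loop; the inner while is the dropWhile
def altLoop (delta : Int) : List Int → List Int → Int → List Int → Int × List Int
  | [], _, matched_count, time_diffs => (matched_count, time_diffs)
  | t :: gts, preds, matched_count, time_diffs =>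
    let preds' := preds.dropWhile (fun p => decide (p < t - delta))
    match preds' with
    | [] => altLoop delta gts [] matched_count time_diffs
    | p :: rest =>
      if p ≤ t + delta then
        altLoop delta gts rest (matched_count + 1) (time_diffs ++ [|t - p|])
      else
        altLoop delta gts (p :: rest) matched_count time_diffs

def match_transitions_with_tolerance_detailed_alt (gt_times : List Int) (pred_times : List Int) (delta : Int) : Int × List Int :=
  let preds := PySem.List.sorted (PySem.Set.ofList pred_times) (fun x => x) false
  altLoop delta (PySem.List.sorted gt_times (fun x => x) false) preds 0 []

-- ===== PRECONDITION & SPEC =====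
def Spec_match_transitions_with_tolerance_detailed (gt_times : List Int) (pred_times : List Int) (delta : Int) (out : Int × List Int) : Prop := out = match_transitions_with_tolerance_detailed_alt gt_times pred_times delta
instance (gt_times : List Int) (pred_times : List Int) (delta : Int) (out : Int × List Int) : Decidable (Spec_match_transitions_with_tolerance_detailed gt_times pred_times delta out) := by unfold Spec_match_transitions_with_tolerance_detailed; infer_instance

-- ===== CLAIM (what is proved, stated in full; the proofs are below) =====
def Claim_equal_match_transitions_with_tolerance_detailed : Prop := ∀ (gt_times : List Int) (pred_times : List Int) (delta : Int), Dom_match_transitions_with_tolerance_detailed gt_times pred_times delta → Spec_match_transitions_with_tolerance_detailed gt_times pred_times delta (match_transitions_with_tolerance_detailed gt_times pred_times delta)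

-- ===== LEMMAS AND PROOFS =====

lemma head?_eq_of_mem_iff {l1 l2 : List Int}
    (h1 : l1.Pairwise (· ≤ ·)) (h2 : l2.Pairwise (· ≤ ·))
    (hm : ∀ x, x ∈ l1 ↔ x ∈ l2) : l1.head? = l2.head? := by
  match l1, l2 with
  | [], [] => rfl
  | [], b :: t2 => exact absurd ((hm b).mpr (by simp)) (by simp)
  | a :: t1, [] => exact absurd ((hm a).mp (by simp)) (by simp)
  | a :: t1, b :: t2 =>
    simp only [List.head?_cons, Option.some.injEq]
    have ha : a ∈ b :: t2 := (hm a).mp (by simp)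
    have hb : b ∈ a :: t1 := (hm b).mpr (by simp)
    have h1' := List.pairwise_cons.mp h1
    have h2' := List.pairwise_cons.mp h2
    rcases List.mem_cons.mp ha with h | h
    · exact h
    · have hba : b ≤ a := h2'.1 a h
      rcases List.mem_cons.mp hb with h' | h'
      · exact h'.symm
      · exact le_antisymm (h1'.1 b h') hba

lemma dropWhile_sorted_eq_filter (lo : Int) (l : List Int) (h : l.Pairwise (· ≤ ·)) :
    l.dropWhile (fun p => decide (p < lo)) = l.filter (fun p => decide (lo ≤ p)) := by
  induction l with
  | nil => rfl
  | cons a t ih =>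
    have h' := List.pairwise_cons.mp h
    by_cases hlt : a < lo
    · simp [List.dropWhile_cons, hlt, not_le.mpr hlt, ih h'.2]
    · push_neg at hlt
      have : t.filter (fun p => decide (lo ≤ p)) = t := by
        apply List.filter_eq_self.mpr
        intro x hx
        simpa using le_trans hlt (h'.1 x hx)
      simp [not_lt.mpr hlt, List.filter_cons, hlt, this]


lemma contains_add_bool (used : PySem.Set Int) (p x : Int) :
    (!(PySem.Set.contains (PySem.Set.add used p) x)) = ((!(x == p)) && !(PySem.Set.contains used x)) := by
  by_cases hxp : x = p <;> by_cases hxu : x ∈ used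
  · subst hxp
    simp [PySem.Set.contains_eq_listContains, List.contains_iff_mem, PySem.Set.mem_add, hxu]
  · subst hxp
    simp [PySem.Set.contains_eq_listContains, List.contains_iff_mem, PySem.Set.mem_add, hxu]
  · simp [PySem.Set.contains_eq_listContains, List.contains_iff_mem, PySem.Set.mem_add, hxu, hxp]
  · simp [PySem.Set.contains_eq_listContains, List.contains_iff_mem, PySem.Set.mem_add, hxu, hxp]

lemma main_loop (delta : Int) (D P : List Int)
    (hDP : ∀ x, x ∈ D ↔ x ∈ P)
    (hD : D.Pairwise (· < ·)) (hP : P.Pairwise (· ≤ ·)) :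
    ∀ (gts : List Int) (used : PySem.Set Int) (skipped rem : List Int)
      (mc : Int) (diffs : List Int),
      gts.Pairwise (· ≤ ·) →
      D.filter (fun p => !(PySem.Set.contains used p)) = skipped ++ rem →
      (∀ x ∈ skipped, ∀ t ∈ gts, x < t - delta) →
      (let r := gts.foldl (stepA P delta) (mc, used, diffs); (r.1, r.2.2))
        = altLoop delta gts rem mc diffs := by
  intro gts
  induction gts with
  | nil => intro used skipped rem mc diffs _ _ _; rfl
  | cons t gts ih =>
    intro used skipped rem mc diffs hsort hinv hskip
    have hsort' := List.pairwise_cons.mp hsort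
    set lo := t - delta with hlo
    set hi := t + delta with hhi
    have hDf : (D.filter (fun p => !(PySem.Set.contains used p))).Pairwise (· < ·) := hD.filter _
    have hsr : (skipped ++ rem).Pairwise (· < ·) := hinv ▸ hDf
    have hrem_lt : rem.Pairwise (· < ·) := (List.pairwise_append.mp hsr).2.1
    have hrem : rem.Pairwise (· ≤ ·) := hrem_lt.imp le_of_lt
    have hskip_lo : ∀ x ∈ skipped, x < lo := fun x hx => hskip x hx t (by simp)
    have hdw : rem.dropWhile (fun p => decide (p < lo)) = rem.filter (fun p => decide (lo ≤ p)) :=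
      dropWhile_sorted_eq_filter lo rem hrem
    have hhead : (P.filter (fun pt => decide (lo ≤ pt) && decide (pt ≤ hi) && !(PySem.Set.contains used pt))).head?
        = ((rem.filter (fun p => decide (lo ≤ p))).filter (fun p => decide (p ≤ hi))).head? := by
      apply head?_eq_of_mem_iff (hP.filter _) (((hrem.filter _).filter _))
      intro x
      simp only [List.mem_filter, Bool.and_eq_true, decide_eq_true_eq, Bool.not_eq_true']
      constructor
      · rintro ⟨hxP, ⟨hxlo, hxhi⟩, hxu⟩
        have hxD : x ∈ D := (hDP x).mpr hxP
        have hx : x ∈ skipped ++ rem := by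
          rw [← hinv]; rw [List.mem_filter]; exact ⟨hxD, by rw [hxu]; rfl⟩
        rcases List.mem_append.mp hx with h | h
        · exact absurd hxlo (not_le.mpr (hskip_lo x h))
        · exact ⟨⟨h, hxlo⟩, hxhi⟩
      · rintro ⟨⟨hxr, hxlo⟩, hxhi⟩
        have hx' : x ∈ D.filter (fun p => !(PySem.Set.contains used p)) := by
          rw [hinv]; exact List.mem_append.mpr (Or.inr hxr)
        rw [List.mem_filter] at hx'
        exact ⟨(hDP x).mp hx'.1, ⟨hxlo, hxhi⟩, by simpa using hx'.2⟩
    rcases hfw : rem.filter (fun p => decide (lo ≤ p)) with _ | ⟨p, rest⟩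
    · -- lower bound kills everything: no candidate
      have hcand : P.filter (fun pt => decide (lo ≤ pt) && decide (pt ≤ hi) && !(PySem.Set.contains used pt)) = [] := by
        rw [← List.head?_eq_none_iff, hhead, hfw]; rfl
      have hstep : stepA P delta (mc, used, diffs) t = (mc, used, diffs) := by
        simp only [stepA]; rw [hcand]
      simp only [List.foldl_cons, altLoop, ← hlo, ← hhi, hdw, hfw, hstep]
      refine (ih used (skipped ++ rem) [] mc diffs hsort'.2 (by rw [hinv, List.append_nil]) ?_)
      intro x hx t' ht'
      rcases List.mem_append.mp hx with h | h
      · exact hskip x h t' (List.mem_cons_of_mem _ ht')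
      · have hxlt : x < lo := by
          by_contra hge
          have hmem : x ∈ rem.filter (fun p => decide (lo ≤ p)) := by
            rw [List.mem_filter]; exact ⟨h, by simpa using not_lt.mp hge⟩
          rw [hfw] at hmem; simp at hmem
        have : t ≤ t' := hsort'.1 t' ht'
        omega
    · have hplo : lo ≤ p := by
        have : p ∈ rem.filter (fun p => decide (lo ≤ p)) := by rw [hfw]; simp
        simpa using (List.mem_filter.mp this).2
      set tw := rem.takeWhile (fun p => decide (p < lo)) with htw
      have hdecomp : rem = tw ++ p :: rest := by
        conv_lhs => rw [← List.takeWhile_append_dropWhile (p := fun p => decide (p < lo)) (l := rem)]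
        rw [hdw, hfw]
      have htw_lo : ∀ x ∈ tw, x < lo := by
        intro x hx; simpa using List.mem_takeWhile_imp hx
      have htpr : (tw ++ p :: rest).Pairwise (· < ·) := hdecomp ▸ hrem_lt
      have hprest : ∀ x ∈ rest, p < x :=
        (List.pairwise_cons.mp (List.pairwise_append.mp htpr).2.1).1
      by_cases hphi : p ≤ hi
      · -- match p
        have hrest : (p :: rest).filter (fun q => decide (q ≤ hi)) = p :: rest.filter (fun q => decide (q ≤ hi)) := by
          simp [List.filter_cons, hphi]
        have hcand : ∃ cs, P.filter (fun pt => decide (lo ≤ pt) && decide (pt ≤ hi) && !(PySem.Set.contains used pt)) = p :: cs := by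
          rw [hfw, hrest] at hhead
          rcases hc : P.filter (fun pt => decide (lo ≤ pt) && decide (pt ≤ hi) && !(PySem.Set.contains used pt)) with _ | ⟨c, cs⟩
          · rw [hc] at hhead; simp at hhead
          · rw [hc] at hhead; simp at hhead; exact ⟨cs, by rw [hhead]⟩
        obtain ⟨cs, hcand⟩ := hcand
        have hstep : stepA P delta (mc, used, diffs) t = (mc + 1, PySem.Set.add used p, diffs ++ [|t - p|]) := by
          simp only [stepA]; rw [hcand]
        simp only [List.foldl_cons, altLoop, ← hlo, ← hhi, hdw, hfw, hstep, if_pos hphi]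
        have hfilter' : D.filter (fun q => !(PySem.Set.contains (PySem.Set.add used p) q))
            = (skipped ++ tw) ++ rest := by
          have step1 : D.filter (fun q => !(PySem.Set.contains (PySem.Set.add used p) q))
              = (D.filter (fun q => !(PySem.Set.contains used q))).filter (fun q => !(q == p)) := by
            rw [List.filter_filter]
            exact List.filter_congr (fun x _ => contains_add_bool used p x)
          rw [step1, hinv, hdecomp,
            show skipped ++ (tw ++ p :: rest) = (skipped ++ tw) ++ p :: rest by simp]
          rw [List.filter_append]
          rw [List.filter_eq_self.mpr ?side]
          case side =>
            intro x hx
            have hxlo : x < lo := by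
              rcases List.mem_append.mp hx with h | h
              · exact hskip_lo x h
              · exact htw_lo x h
            simp; omega
          simp only [List.filter_cons, BEq.rfl, Bool.not_true, Bool.false_eq_true, if_false]
          rw [List.filter_eq_self.mpr ?side2]
          case side2 =>
            intro x hx
            have := hprest x hx
            simp; omega
        refine ih (PySem.Set.add used p) (skipped ++ tw) rest (mc+1) (diffs ++ [|t - p|]) hsort'.2 hfilter' ?_
        intro x hx t' ht'
        have hxlo : x < lo := by
          rcases List.mem_append.mp hx with h | h
          · exact hskip_lo x h
          · exact htw_lo x h
        have : t ≤ t' := hsort'.1 t' ht'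
        omega
      · -- window closed above: no candidate, B keeps p :: rest
        have hrest : (p :: rest).filter (fun q => decide (q ≤ hi)) = [] := by
          rw [List.filter_eq_nil_iff]
          intro x hx
          rcases List.mem_cons.mp hx with h | h
          · subst h; simpa using hphi
          · have := hprest x h; simp; omega
        have hcand : P.filter (fun pt => decide (lo ≤ pt) && decide (pt ≤ hi) && !(PySem.Set.contains used pt)) = [] := by
          rw [← List.head?_eq_none_iff, hhead, hfw, hrest]; rfl
        have hstep : stepA P delta (mc, used, diffs) t = (mc, used, diffs) := by
          simp only [stepA]; rw [hcand]
        simp only [List.foldl_cons, altLoop, ← hlo, ← hhi, hdw, hfw, hstep, if_neg hphi]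
        refine ih used (skipped ++ tw) (p :: rest) mc diffs hsort'.2 ?_ ?_
        · rw [hinv, hdecomp]; simp
        · intro x hx t' ht'
          have hxlo : x < lo := by
            rcases List.mem_append.mp hx with h | h
            · exact hskip_lo x h
            · exact htw_lo x h
          have : t ≤ t' := hsort'.1 t' ht'
          omega

-- ===== VERDICT (by name: the statement is the Claim_ definition above) =====
theorem match_transitions_with_tolerance_detailed_spec : Claim_equal_match_transitions_with_tolerance_detailed := by
  intro gt_times pred_times delta _
  unfold Spec_match_transitions_with_tolerance_detailed
  unfold match_transitions_with_tolerance_detailed match_transitions_with_tolerance_detailed_alt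
  have h := main_loop delta (PySem.List.sorted (PySem.Set.ofList pred_times) (fun x => x) false)
      (PySem.List.sorted pred_times (fun x => x) false)
      (fun x => by simp [PySem.List.mem_sorted, PySem.Set.mem_ofList])
      (PySem.List.sorted_ofList_pairwise_lt pred_times)
      (PySem.List.sorted_pairwise pred_times (fun x => x))
      (PySem.List.sorted gt_times (fun x => x) false) PySem.Set.empty []
      (PySem.List.sorted (PySem.Set.ofList pred_times) (fun x => x) false) 0 []
      (PySem.List.sorted_pairwise gt_times (fun x => x))
      (by simp [PySem.Set.empty, PySem.Set.contains_eq_listContains])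
      (by simp)
  exact h
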